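-- pv_equiv track=rewrite | github.com/molmd/mispr | build/lib/mispr/gaussian/firetasks/geo_transformation.py | _define_charges
-- ===== SOURCE A (Python) =====
-- import itertools
--
-- def _define_charges(ref_charge, fragment_charges):
--     # TODO: check charges on metal atoms so as to not violate valence rule
--     # get a list of possible charges that each fragment can take
--     possible_charges = []
--     if ref_charge == 0:
--         possible_charges.extend((-1, 0, 1))
--     elif ref_charge > 0:
--         for i in range(ref_charge + 1):
--             possible_charges.append(ref_charge - i)
--     else:
--         for i in range(abs(ref_charge - 1)):
--             possible_charges.append(ref_charge + i)
--     # add additional charges to the list of possible charges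
--     if fragment_charges:
--         fragment_charges += [ref_charge - charge for charge in fragment_charges]
--         possible_charges.extend(
--             charge for charge in fragment_charges if charge not in possible_charges
--         )
--     # find possible charge pairs upon breaking a bond; sum = ref_charge
--     charge_pairs = [
--         pair
--         for pair in list(itertools.product(possible_charges, repeat=2))
--         if sum(pair) == ref_charge
--     ]
--
--     charge_ind_map = {j: i for i, j in enumerate(possible_charges)}
--     return possible_charges, charge_pairs, charge_ind_map
-- ===== SOURCE B (Python) =====
-- def _define_charges(ref_charge, fragment_charges):
--     # base charges as a range, built directly instead of an append loop
--     if ref_charge == 0: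
--         possible_charges = [-1, 0, 1]
--     elif ref_charge > 0:
--         possible_charges = list(range(ref_charge, -1, -1))
--     else:
--         possible_charges = list(range(ref_charge, 1))
--     seen = set(possible_charges)
--     for charge in fragment_charges + [ref_charge - c for c in fragment_charges]:
--         if charge not in seen:
--             seen.add(charge)
--             possible_charges.append(charge)
--     # partner lookup in the set: one pass instead of the quadratic product scan
--     charge_pairs = [(a, ref_charge - a) for a in possible_charges
--                     if ref_charge - a in seen]
--     charge_ind_map = {c: i for i, c in enumerate(possible_charges)}
--     return possible_charges, charge_pairs, charge_ind_map
-- ===== Notes on version B (the rewrite author's own statement) =====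
-- stated objective: faster
-- what changed: B builds the base charges directly as a range, dedups the fragment extension with a seen-set instead of repeated list scans, and finds charge pairs by a single pass with a set lookup of the partner ref_charge-a instead of filtering the full quadratic itertools.product; B also does not mutate the fragment_charges argument (return value is identical).
import Mathlib
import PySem

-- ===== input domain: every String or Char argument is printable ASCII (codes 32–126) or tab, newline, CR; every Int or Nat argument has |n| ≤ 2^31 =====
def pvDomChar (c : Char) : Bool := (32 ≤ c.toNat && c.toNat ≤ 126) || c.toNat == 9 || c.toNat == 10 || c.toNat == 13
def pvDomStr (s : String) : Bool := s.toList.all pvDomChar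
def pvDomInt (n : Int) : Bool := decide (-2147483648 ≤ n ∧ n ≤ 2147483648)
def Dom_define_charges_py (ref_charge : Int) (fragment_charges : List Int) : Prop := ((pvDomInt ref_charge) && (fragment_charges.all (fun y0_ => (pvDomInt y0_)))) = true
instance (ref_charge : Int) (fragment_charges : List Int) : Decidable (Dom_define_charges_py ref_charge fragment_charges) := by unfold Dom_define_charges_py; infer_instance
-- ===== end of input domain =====

-- B replaces A's quadratic product-and-filter pair search and list-membership dedup by a
-- set lookup (for each a emit (a, ref-a) if present) and a seen-set; return value only:
-- A mutates its fragment_charges argument in place (fragment_charges += …), B does not.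

-- ===== PORT A =====
-- possible_charges before the fragment-charge extension (the three-way if with append loops)
def pyBaseA (ref_charge : Int) : List Int :=
  if ref_charge = 0 then [-1, 0, 1]
  else if ref_charge > 0 then
    (PySem.List.pyRange 0 (ref_charge + 1) 1).foldl (fun acc i => acc ++ [ref_charge - i]) []
  else
    (PySem.List.pyRange 0 |ref_charge - 1| 1).foldl (fun acc i => acc ++ [ref_charge + i]) []

-- 'if fragment_charges: fragment_charges += [...]; possible_charges.extend(c for c in … if c not in possible_charges)'
-- (list.extend of a generator appends one element at a time, so the 'not in' test sees the
-- elements already appended — hence the fold threading the growing list)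
def pyExtendA (ref_charge : Int) (fragment_charges : List Int) (base : List Int) : List Int :=
  if fragment_charges ≠ [] then
    (fragment_charges ++ fragment_charges.map (fun charge => ref_charge - charge)).foldl
      (fun acc charge => if charge ∈ acc then acc else acc ++ [charge]) base
  else base

-- charge_pairs: itertools.product(possible_charges, repeat=2) filtered by sum(pair) == ref_charge
def pyPairsA (ref_charge : Int) (pc : List Int) : List (Int × Int) :=
  (pc.flatMap (fun a => pc.map (fun b => (a, b)))).filter
    (fun pair => decide (pair.1 + pair.2 = ref_charge))

-- charge_ind_map = {j: i for i, j in enumerate(possible_charges)} (the comprehension is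
-- textually the same in A and B, so one helper serves both ports)
def pyIndexMapA (pc : List Int) : List (Int × Int) :=
  ((PySem.List.enumerate pc 0).foldl (fun d p => d.insert p.2 p.1)
    (PySem.Dict.empty : PySem.Dict Int Int)).items

def define_charges_py (ref_charge : Int) (fragment_charges : List Int) :
    List Int × (List (Int × Int)) × (List (Int × Int)) :=
  let possible_charges := pyExtendA ref_charge fragment_charges (pyBaseA ref_charge)
  (possible_charges, pyPairsA ref_charge possible_charges, pyIndexMapA possible_charges)

-- ===== PORT B =====
-- base charges as a range, built directly instead of an append loop
def altBase (ref_charge : Int) : List Int :=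
  if ref_charge = 0 then [-1, 0, 1]
  else if ref_charge > 0 then PySem.List.pyRange ref_charge (-1) (-1)
  else PySem.List.pyRange ref_charge 1 1

-- the loop over fragment_charges + complements, threading (possible_charges, seen)
def altState (ref_charge : Int) (fragment_charges : List Int) : List Int × PySem.Set Int :=
  (fragment_charges ++ fragment_charges.map (fun c => ref_charge - c)).foldl
    (fun (s : List Int × PySem.Set Int) charge =>
      if charge ∈ s.2 then s else (s.1 ++ [charge], s.2.add charge))
    (altBase ref_charge, PySem.Set.ofList (altBase ref_charge))

-- [(a, ref_charge - a) for a in possible_charges if ref_charge - a in seen]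
def altPairs (ref_charge : Int) (pc : List Int) (seen : PySem.Set Int) : List (Int × Int) :=
  (pc.filter (fun a => decide ((ref_charge - a) ∈ seen))).map (fun a => (a, ref_charge - a))

def define_charges_py_alt (ref_charge : Int) (fragment_charges : List Int) :
    List Int × (List (Int × Int)) × (List (Int × Int)) :=
  let st := altState ref_charge fragment_charges
  (st.1, altPairs ref_charge st.1 st.2, pyIndexMapA st.1)

-- ===== PRECONDITION & SPEC =====
def Spec_define_charges_py (ref_charge : Int) (fragment_charges : List Int) (out : List Int × (List (Int × Int)) × (List (Int × Int))) : Prop := out = define_charges_py_alt ref_charge fragment_charges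
instance (ref_charge : Int) (fragment_charges : List Int) (out : List Int × (List (Int × Int)) × (List (Int × Int))) : Decidable (Spec_define_charges_py ref_charge fragment_charges out) := by unfold Spec_define_charges_py; infer_instance

-- ===== CLAIM (what is proved, stated in full; the proofs are below) =====
def Claim_equal_define_charges_py : Prop := ∀ (ref_charge : Int) (fragment_charges : List Int), Dom_define_charges_py ref_charge fragment_charges → Spec_define_charges_py ref_charge fragment_charges (define_charges_py ref_charge fragment_charges)

-- ===== LEMMAS AND PROOFS =====

-- the two base lists coincide
lemma base_eq (ref_charge : Int) : altBase ref_charge = pyBaseA ref_charge := by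
  unfold altBase pyBaseA
  by_cases h0 : ref_charge = 0
  · simp [h0]
  · by_cases hp : ref_charge > 0
    · simp only [h0, hp, if_false, if_true]
      rw [PySem.List.pyRange_neg_one, PySem.List.pyRange_one,
        PySem.List.foldl_append_singleton_eq_map]
      simp [List.map_map, Function.comp]
    · simp only [if_neg h0, if_neg hp]
      rw [PySem.List.foldl_append_singleton_eq_map, PySem.List.pyRange_one,
        PySem.List.pyRange_one]
      have habs : (|ref_charge - 1| - 0).toNat = (1 - ref_charge).toNat := by
        rcases abs_cases (ref_charge - 1) with ⟨h, _⟩ | ⟨h, _⟩ <;> omega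
      rw [habs]
      simp [List.map_map, Function.comp]

lemma base_nodup (ref_charge : Int) : (altBase ref_charge).Nodup := by
  unfold altBase
  by_cases h0 : ref_charge = 0
  · simp [h0]
  · by_cases hp : ref_charge > 0
    · simp only [if_neg h0, if_pos hp]
      rw [PySem.List.pyRange_neg_one]
      refine List.Nodup.map ?_ (List.nodup_range)
      intro a b hab
      dsimp only at hab
      omega
    · simp only [if_neg h0, if_neg hp]
      exact PySem.List.nodup_pyRange_one _ _

-- the B loop threading (list, seen-set) computes A's membership-dedup loop, and keeps
-- the invariant 'seen holds exactly the list's elements' and nodup of the list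
lemma state_fold (L : List Int) : ∀ (acc : List Int) (s : PySem.Set Int),
    (∀ x : Int, x ∈ s ↔ x ∈ acc) → acc.Nodup →
    (L.foldl (fun (t : List Int × PySem.Set Int) charge =>
        if charge ∈ t.2 then t else (t.1 ++ [charge], t.2.add charge)) (acc, s)).1
      = L.foldl (fun acc charge => if charge ∈ acc then acc else acc ++ [charge]) acc
    ∧ (∀ x : Int, x ∈ (L.foldl (fun (t : List Int × PySem.Set Int) charge =>
        if charge ∈ t.2 then t else (t.1 ++ [charge], t.2.add charge)) (acc, s)).2
        ↔ x ∈ (L.foldl (fun (t : List Int × PySem.Set Int) charge =>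
        if charge ∈ t.2 then t else (t.1 ++ [charge], t.2.add charge)) (acc, s)).1)
    ∧ (L.foldl (fun (t : List Int × PySem.Set Int) charge =>
        if charge ∈ t.2 then t else (t.1 ++ [charge], t.2.add charge)) (acc, s)).1.Nodup := by
  induction L with
  | nil => intro acc s h hn; exact ⟨rfl, h, hn⟩
  | cons c t ih =>
    intro acc s h hn
    simp only [List.foldl_cons]
    by_cases hc : c ∈ s
    · have hca : c ∈ acc := (h c).1 hc
      simp only [hc, if_pos, if_pos hca]
      exact ih acc s h hn
    · have hca : c ∉ acc := fun hx => hc ((h c).2 hx)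
      simp only [if_neg hc, if_neg hca]
      refine ih (acc ++ [c]) (s.add c) ?_ ?_
      · intro x
        rw [PySem.Set.mem_add]
        simp [h x]
      · simp only [List.nodup_append]
        refine ⟨hn, by simp, ?_⟩
        intro a ha b hb
        rw [List.mem_singleton] at hb
        subst hb
        intro hab
        subst hab
        exact hca ha

-- on a duplicate-free list, A's inner scan for partners of a finds exactly ref - a (if present)
lemma filter_partner (ref_charge a : Int) (pc : List Int) (h : pc.Nodup) :
    pc.filter (fun b => decide (a + b = ref_charge))
      = if (ref_charge - a) ∈ pc then [ref_charge - a] else [] := by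
  induction pc with
  | nil => simp
  | cons x t ih =>
    have ht := h.of_cons
    have hx := (List.nodup_cons.mp h).1
    by_cases hxe : a + x = ref_charge
    · have hxv : x = ref_charge - a := by omega
      subst hxv
      simp only [List.filter_cons, hxe, decide_true, if_pos]
      rw [ih ht, if_neg hx]
      simp
    · have hne : ref_charge - a ≠ x := fun hh => hxe (by omega)
      simp only [List.filter_cons, hxe, decide_false, if_neg, Bool.false_eq_true,
        not_false_iff]
      rw [ih ht]
      simp [List.mem_cons, hne]

lemma map_filter_eq_flatMap (p : Int → Bool) (f : Int → Int × Int) (l : List Int) :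
    (l.filter p).map f = l.flatMap (fun a => if p a then [f a] else []) := by
  induction l with
  | nil => simp
  | cons x t ih =>
    by_cases hx : p x <;> simp [hx, ih]

-- the two pair computations agree on a duplicate-free list whose seen-set matches it
lemma pairs_eq (ref_charge : Int) (pc : List Int) (seen : PySem.Set Int)
    (hn : pc.Nodup) (hs : ∀ x : Int, x ∈ seen ↔ x ∈ pc) :
    altPairs ref_charge pc seen = pyPairsA ref_charge pc := by
  unfold altPairs pyPairsA
  rw [List.filter_flatMap]
  have h1 : ∀ a : Int, (pc.map (fun b => (a, b))).filter
      (fun pair => decide (pair.1 + pair.2 = ref_charge))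
      = (pc.filter (fun b => decide (a + b = ref_charge))).map (fun b => (a, b)) := by
    intro a; rw [List.filter_map]; rfl
  have h2 : (pc.filter (fun a => decide ((ref_charge - a) ∈ seen)))
      = pc.filter (fun a => decide ((ref_charge - a) ∈ pc)) := by
    apply List.filter_congr
    intro a _
    simp [hs]
  rw [h2, map_filter_eq_flatMap]
  apply List.flatMap_congr
  intro a _
  rw [h1, filter_partner ref_charge a pc hn]
  by_cases hm : (ref_charge - a) ∈ pc <;> simp [hm]

-- ===== VERDICT (by name: the statement is the Claim_ definition above) =====
theorem define_charges_py_spec : Claim_equal_define_charges_py := by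
  intro ref_charge fragment_charges _
  unfold Spec_define_charges_py define_charges_py define_charges_py_alt
  have hbase := base_eq ref_charge
  have hnodup : (pyBaseA ref_charge).Nodup := hbase ▸ base_nodup ref_charge
  have hmem : ∀ x : Int, x ∈ PySem.Set.ofList (pyBaseA ref_charge) ↔ x ∈ pyBaseA ref_charge :=
    fun x => PySem.Set.mem_ofList _ x
  have hst := state_fold (fragment_charges ++ fragment_charges.map (fun c => ref_charge - c))
      (pyBaseA ref_charge) (PySem.Set.ofList (pyBaseA ref_charge)) hmem hnodup
  have hstate1 : (altState ref_charge fragment_charges).1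
      = pyExtendA ref_charge fragment_charges (pyBaseA ref_charge) := by
    unfold altState pyExtendA
    rw [hbase]
    by_cases hf : fragment_charges = []
    · simp [hf]
    · rw [if_pos hf]
      exact hst.1
  have hstate2 : ∀ x : Int, x ∈ (altState ref_charge fragment_charges).2
      ↔ x ∈ (altState ref_charge fragment_charges).1 := by
    unfold altState; rw [hbase]; exact hst.2.1
  have hstaten : (altState ref_charge fragment_charges).1.Nodup := by
    unfold altState; rw [hbase]; exact hst.2.2
  refine Prod.ext ?_ (Prod.ext ?_ ?_)
  · simpa using hstate1.symm
  · show pyPairsA ref_charge _ = altPairs ref_charge _ _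
    rw [← hstate1, pairs_eq ref_charge _ _ hstaten hstate2]
  · show pyIndexMapA _ = pyIndexMapA _
    rw [← hstate1]
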